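-- pv_equiv track=rewrite | github.com/pedrojunqueira/pybites | 118/duplicates.py | get_duplicate_indices
-- ===== SOURCE A (Python) =====
-- from collections import Counter
--
-- def get_duplicate_indices(words):
--     """Given a list of words, loop through the words and check for each
--     word if it occurs more than once.
--     If so return the index of its first occurrence.
--     For example in the following list 'is' and 'it'
--     occur more than once, and they are at indices 0 and 1 so you would
--     return [0, 1]:
--     ['is', 'it', 'true', 'or', 'is', 'it', 'not?'] => [0, 1]
--     Make sure the returning list is unique and sorted in ascending order."""
--     c = Counter(words)
--     found = []
--     indexes = []
--     for i, word in enumerate(words):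
--         if c[word] > 1 and word not in found:
--             found.append(word)
--             indexes.append(i)
--     return indexes
-- ===== SOURCE B (Python) =====
-- def get_duplicate_indices(words):
--     first_index = {}
--     count = {}
--     for i, word in enumerate(words):
--         if word not in first_index:
--             first_index[word] = i
--         count[word] = count.get(word, 0) + 1
--     return sorted(i for word, i in first_index.items() if count[word] > 1)
-- ===== Notes on version B (the rewrite author's own statement) =====
-- stated objective: faster
-- what changed: Replaces A's pre-computed Counter plus in-order append loop with a linear 'word not in found' list scan by a single pass building a first-index table and a count table, then filtering the table's items and sorting the indices.
import Mathlib
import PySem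

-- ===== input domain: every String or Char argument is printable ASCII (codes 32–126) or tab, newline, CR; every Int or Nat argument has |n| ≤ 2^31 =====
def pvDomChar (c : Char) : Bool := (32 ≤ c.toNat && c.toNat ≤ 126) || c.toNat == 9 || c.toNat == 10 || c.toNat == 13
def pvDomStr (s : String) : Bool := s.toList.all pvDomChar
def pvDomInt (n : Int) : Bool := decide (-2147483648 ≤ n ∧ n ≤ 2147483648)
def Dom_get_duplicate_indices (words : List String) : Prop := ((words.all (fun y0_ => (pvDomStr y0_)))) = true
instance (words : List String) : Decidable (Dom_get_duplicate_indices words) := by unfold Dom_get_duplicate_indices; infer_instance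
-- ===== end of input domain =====

-- B builds a first-index table and a count table in one pass, then filters the table and sorts; A keeps a found-list and appends in order.

-- ===== PORT A =====
def pvStepA (c : PySem.Dict String Int) (st : List String × List Int) (p : Int × String) : List String × List Int :=
  if PySem.Dict.getD c p.2 0 > 1 ∧ p.2 ∉ st.1 then (st.1 ++ [p.2], st.2 ++ [p.1]) else st

def get_duplicate_indices (words : List String) : List Int :=
  let c := PySem.Dict.counter words
  ((PySem.List.enumerate words).foldl (pvStepA c) ([], [])).2

-- ===== PORT B =====
def pvStepFI (fi : PySem.Dict String Int) (p : Int × String) : PySem.Dict String Int :=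
  if ¬ fi.contains p.2 then fi.insert p.2 p.1 else fi

def pvStepCnt (cnt : PySem.Dict String Int) (p : Int × String) : PySem.Dict String Int :=
  cnt.insert p.2 (cnt.getD p.2 0 + 1)

def get_duplicate_indices_alt (words : List String) : List Int :=
  let st := (PySem.List.enumerate words).foldl
    (fun st p => (pvStepFI st.1 p, pvStepCnt st.2 p)) (PySem.Dict.empty, PySem.Dict.empty)
  PySem.List.sorted
    (((st.1.items).filter (fun kv => PySem.Dict.getD st.2 kv.1 0 > 1)).map (·.2))
    (fun x => x) false

-- ===== PRECONDITION & SPEC =====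
def Spec_get_duplicate_indices (words : List String) (out : List Int) : Prop := out = get_duplicate_indices_alt words
instance (words : List String) (out : List Int) : Decidable (Spec_get_duplicate_indices words out) := by unfold Spec_get_duplicate_indices; infer_instance

-- ===== CLAIM (what is proved, stated in full; the proofs are below) =====
def Claim_equal_get_duplicate_indices : Prop := ∀ (words : List String), Dom_get_duplicate_indices words → Spec_get_duplicate_indices words (get_duplicate_indices words)

-- ===== LEMMAS AND PROOFS =====

-- the simultaneous fold over the two independent dictionaries splits componentwise
theorem pv_fold_pair (l : List (Int × String)) (a b : PySem.Dict String Int) :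
    l.foldl (fun st p => (pvStepFI st.1 p, pvStepCnt st.2 p)) (a, b)
      = (l.foldl pvStepFI a, l.foldl pvStepCnt b) := by
  induction l generalizing a b with
  | nil => rfl
  | cons p t ih => simp [List.foldl, ih]

-- B's count table looks up like Counter(words)
theorem pv_cnt_getD (words : List String) (w : String) :
    PySem.Dict.getD ((PySem.List.enumerate words).foldl pvStepCnt PySem.Dict.empty) w 0
      = (words.count w : Int) := by
  have h : (PySem.List.enumerate words).foldl pvStepCnt PySem.Dict.empty
      = ((PySem.List.enumerate words).map (·.2)).foldl
          (fun d x => d.insert x (d.getD x 0 + 1)) PySem.Dict.empty := by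
    rw [List.foldl_map]; rfl
  rw [h, PySem.List.map_snd_enumerate, PySem.Dict.getD_foldl_insert_add_one]
  simp [PySem.Dict.getD_empty]

-- main invariant: A's loop state is the filtered projection of B's first-index table
theorem pv_main (c : PySem.Dict String Int) (l : List (Int × String))
    (fi : PySem.Dict String Int) (found : List String) (idx : List Int)
    (hf : found = ((fi.items).filter (fun kv => PySem.Dict.getD c kv.1 0 > 1)).map (·.1))
    (hi : idx = ((fi.items).filter (fun kv => PySem.Dict.getD c kv.1 0 > 1)).map (·.2)) :
    (l.foldl (pvStepA c) (found, idx)).2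
      = (((l.foldl pvStepFI fi).items).filter (fun kv => PySem.Dict.getD c kv.1 0 > 1)).map (·.2) := by
  induction l generalizing fi found idx with
  | nil => simpa using hi
  | cons p t ih =>
    simp only [List.foldl]
    by_cases hc : fi.contains p.2
    · -- word already seen: both sides keep their state
      have hfi : pvStepFI fi p = fi := by simp [pvStepFI, hc]
      have hA : pvStepA c (found, idx) p = (found, idx) := by
        unfold pvStepA
        by_cases hgt : PySem.Dict.getD c p.2 0 > 1
        · -- then p.2 ∈ found
          have hk : p.2 ∈ fi.keys := (PySem.Dict.contains_iff_mem_keys fi p.2).mp hc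
          have : ∃ v, (p.2, v) ∈ fi.items := by
            simpa [PySem.Dict.keys, List.mem_map, Prod.ext_iff] using hk
          obtain ⟨v, hv⟩ := this
          have hmem : p.2 ∈ found := by
            subst hf
            exact List.mem_map.mpr ⟨(p.2, v), List.mem_filter.mpr ⟨hv, by simpa using hgt⟩, rfl⟩
          simp [hmem]
        · simp [hgt]
      rw [hfi, hA]; exact ih fi found idx hf hi
    · -- fresh word: B appends to the table, A appends iff duplicated
      have hfi : pvStepFI fi p = fi.insert p.2 p.1 := by simp [pvStepFI, hc]
      have hitems : (fi.insert p.2 p.1).items = fi.items ++ [(p.2, p.1)] :=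
        PySem.Dict.items_insert_of_not_contains fi p.1 (by simpa using hc)
      have hnotfound : p.2 ∉ found := by
        subst hf
        intro hmem
        obtain ⟨kv, hkv, hk⟩ := List.mem_map.mp hmem
        have : kv.1 ∈ fi.keys := by
          have := List.mem_filter.mp hkv
          exact List.mem_map.mpr ⟨kv, this.1, rfl⟩
        rw [hk] at this
        exact hc ((PySem.Dict.contains_iff_mem_keys fi p.2).mpr this)
      by_cases hgt : PySem.Dict.getD c p.2 0 > 1
      · have hA : pvStepA c (found, idx) p = (found ++ [p.2], idx ++ [p.1]) := by
          simp [pvStepA, hgt, hnotfound]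
        rw [hfi, hA]
        exact ih (fi.insert p.2 p.1) (found ++ [p.2]) (idx ++ [p.1])
          (by simp [hf, hitems, hgt]) (by simp [hi, hitems, hgt])
      · have hA : pvStepA c (found, idx) p = (found, idx) := by simp [pvStepA, hgt]
        rw [hfi, hA]
        exact ih (fi.insert p.2 p.1) found idx
          (by simp [hf, hitems, hgt]) (by simp [hi, hitems, hgt])

-- values of B's first-index table stay strictly increasing along the enumerate fold
theorem pv_values_pairwise (l : List (Int × String)) (fi : PySem.Dict String Int)
    (hl : l.Pairwise (fun p q => p.1 < q.1))
    (hfi : ((fi.items).map (·.2)).Pairwise (· < ·))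
    (hlt : ∀ v ∈ (fi.items).map (·.2), ∀ p ∈ l, v < p.1) :
    (((l.foldl pvStepFI fi).items).map (·.2)).Pairwise (· < ·) := by
  induction l generalizing fi with
  | nil => simpa using hfi
  | cons p t ih =>
    simp only [List.foldl]
    rcases List.pairwise_cons.mp hl with ⟨hp, ht⟩
    by_cases hc : fi.contains p.2
    · have hfi' : pvStepFI fi p = fi := by simp [pvStepFI, hc]
      rw [hfi']
      exact ih fi ht hfi (fun v hv q hq => hlt v hv q (List.mem_cons_of_mem _ hq))
    · have hfi' : pvStepFI fi p = fi.insert p.2 p.1 := by simp [pvStepFI, hc]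
      have hitems : (fi.insert p.2 p.1).items = fi.items ++ [(p.2, p.1)] :=
        PySem.Dict.items_insert_of_not_contains fi p.1 (by simpa using hc)
      rw [hfi']
      refine ih _ ht ?_ ?_
      · rw [hitems]
        simp only [List.map_append, List.map_cons, List.map_nil]
        rw [List.pairwise_append]
        refine ⟨hfi, by simp, ?_⟩
        intro v hv w hw
        simp at hw
        subst hw
        exact hlt v hv p (List.mem_cons_self)
      · intro v hv q hq
        rw [hitems] at hv
        simp only [List.map_append, List.mem_append, List.map_cons, List.map_nil] at hv
        rcases hv with hv | hv
        · exact hlt v hv q (List.mem_cons_of_mem _ hq)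
        · simp at hv; subst hv; exact hp q hq

-- ===== VERDICT (by name: the statement is the Claim_ definition above) =====
theorem get_duplicate_indices_spec : Claim_equal_get_duplicate_indices := by
  unfold Claim_equal_get_duplicate_indices
  intro words _
  unfold Spec_get_duplicate_indices
  simp only [get_duplicate_indices, get_duplicate_indices_alt, pv_fold_pair]
  have hpred : ((((PySem.List.enumerate words).foldl pvStepFI PySem.Dict.empty).items).filter
        (fun kv => PySem.Dict.getD ((PySem.List.enumerate words).foldl pvStepCnt PySem.Dict.empty) kv.1 0 > 1))
      = ((((PySem.List.enumerate words).foldl pvStepFI PySem.Dict.empty).items).filter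
        (fun kv => PySem.Dict.getD (PySem.Dict.counter words) kv.1 0 > 1)) := by
    apply List.filter_congr
    intro kv _
    rw [pv_cnt_getD, PySem.Dict.getD_counter]
  rw [hpred]
  have hA : ((PySem.List.enumerate words).foldl (pvStepA (PySem.Dict.counter words)) ([], [])).2
      = ((((PySem.List.enumerate words).foldl pvStepFI PySem.Dict.empty).items).filter
          (fun kv => PySem.Dict.getD (PySem.Dict.counter words) kv.1 0 > 1)).map (·.2) :=
    pv_main _ _ PySem.Dict.empty [] [] (by simp [PySem.Dict.empty]) (by simp [PySem.Dict.empty])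
  have hpw : (((((PySem.List.enumerate words).foldl pvStepFI PySem.Dict.empty).items).filter
        (fun kv => PySem.Dict.getD (PySem.Dict.counter words) kv.1 0 > 1)).map (·.2)).Pairwise
      (fun a b : Int => a < b) := by
    have hall : ((((PySem.List.enumerate words).foldl pvStepFI PySem.Dict.empty).items).map (·.2)).Pairwise
        (fun a b : Int => a < b) := by
      apply pv_values_pairwise (PySem.List.enumerate words) PySem.Dict.empty
        (PySem.List.pairwise_lt_enumerate words 0)
      · simp [PySem.Dict.empty]
      · simp [PySem.Dict.empty]
    exact hall.sublist (List.Sublist.map _ List.filter_sublist)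
  rw [hA]
  exact (PySem.List.sorted_eq_self_of_pairwise _ _
    (hpw.imp (fun h => le_of_lt h))).symm
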